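-- pv_equiv track=rewrite | github.com/NextronSystems/thunderstorm-collector | scripts/thunderstorm-collector-py2.py | is_cloud_path
-- ===== SOURCE A (Python) =====
-- CLOUD_DIR_NAMES = set(["onedrive", "dropbox", ".dropbox", "googledrive", "google drive",
--                        "icloud drive", "iclouddrive", "nextcloud", "owncloud", "mega",
--                        "megasync", "tresorit", "syncthing"])
--
-- def is_cloud_path(filepath):
--     segments = filepath.replace("\\", "/").lower().split("/")
--     for seg in segments:
--         if seg in CLOUD_DIR_NAMES:
--             return True
--         if seg.startswith("onedrive - ") or seg.startswith("onedrive-") or seg.startswith("nextcloud-"):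
--             return True
--     if "/library/cloudstorage" in filepath.lower():
--         return True
--     return False
-- ===== SOURCE B (Python) =====
-- # B: instead of splitting the path into segments and testing each against the set,
-- # wrap the normalized path in slashes once and do boundary-delimited substring searches.
-- _CLOUD_NAMES = ("onedrive", "dropbox", ".dropbox", "googledrive", "google drive",
--                 "icloud drive", "iclouddrive", "nextcloud", "owncloud", "mega",
--                 "megasync", "tresorit", "syncthing")
-- _CLOUD_PREFIXES = ("onedrive - ", "onedrive-", "nextcloud-")
--
-- def is_cloud_path(filepath):
--     hay = "/" + filepath.replace("\\", "/").lower() + "/"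
--     return (any("/" + name + "/" in hay for name in _CLOUD_NAMES)
--             or any("/" + p in hay for p in _CLOUD_PREFIXES)
--             or "/library/cloudstorage" in filepath.lower())
-- ===== Notes on version B (the rewrite author's own statement) =====
-- stated objective: alternative
-- what changed: B drops the split-into-segments loop with per-segment set membership and prefix tests, instead wrapping the normalized path in slashes once and doing boundary-delimited substring searches ('/name/' and '/prefix' in '/'+path+'/') for each cloud name, the way the suggested regex alternation would scan.
import Mathlib
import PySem

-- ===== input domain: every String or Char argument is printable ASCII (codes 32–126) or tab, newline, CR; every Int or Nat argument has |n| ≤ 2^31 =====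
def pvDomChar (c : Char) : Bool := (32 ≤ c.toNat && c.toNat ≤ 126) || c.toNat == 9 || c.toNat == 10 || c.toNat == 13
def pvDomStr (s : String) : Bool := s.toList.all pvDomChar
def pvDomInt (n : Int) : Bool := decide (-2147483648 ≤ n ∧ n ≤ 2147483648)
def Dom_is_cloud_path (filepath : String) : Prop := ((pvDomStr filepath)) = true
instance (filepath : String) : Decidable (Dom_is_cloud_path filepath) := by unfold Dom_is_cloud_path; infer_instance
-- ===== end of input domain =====

-- B replaces A's split-into-segments loop (set membership / prefix test per segment) by
-- boundary-delimited substring searches in the slash-wrapped normalized path (objective: alternative/idiomatic).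

-- ===== PORT A =====
def cloudDirNames : List (List Char) := PySem.Set.ofList
  ["onedrive".toList, "dropbox".toList, ".dropbox".toList, "googledrive".toList,
   "google drive".toList, "icloud drive".toList, "iclouddrive".toList, "nextcloud".toList,
   "owncloud".toList, "mega".toList, "megasync".toList, "tresorit".toList, "syncthing".toList]

def is_cloud_path (filepath : String) : Bool :=
  let segments := PySem.Chars.splitOn
    (PySem.Chars.lower (PySem.Chars.replace filepath.toList "\\".toList "/".toList)) "/".toList
  (segments.any (fun seg =>
      cloudDirNames.contains seg
      || PySem.Chars.startswith seg "onedrive - ".toList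
      || PySem.Chars.startswith seg "onedrive-".toList
      || PySem.Chars.startswith seg "nextcloud-".toList))
  || PySem.Chars.isIn "/library/cloudstorage".toList (PySem.Chars.lower filepath.toList)

-- ===== PORT B =====
def cloudNamesB : List (List Char) :=
  ["onedrive".toList, "dropbox".toList, ".dropbox".toList, "googledrive".toList,
   "google drive".toList, "icloud drive".toList, "iclouddrive".toList, "nextcloud".toList,
   "owncloud".toList, "mega".toList, "megasync".toList, "tresorit".toList, "syncthing".toList]

def cloudPrefixesB : List (List Char) :=
  ["onedrive - ".toList, "onedrive-".toList, "nextcloud-".toList]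

def is_cloud_path_alt (filepath : String) : Bool :=
  let hay := '/' :: (PySem.Chars.lower (PySem.Chars.replace filepath.toList "\\".toList "/".toList) ++ ['/'])
  (cloudNamesB.any (fun name => PySem.Chars.isIn ('/' :: (name ++ ['/'])) hay))
  || (cloudPrefixesB.any (fun p => PySem.Chars.isIn ('/' :: p) hay))
  || PySem.Chars.isIn "/library/cloudstorage".toList (PySem.Chars.lower filepath.toList)

-- ===== PRECONDITION & SPEC =====
def Spec_is_cloud_path (filepath : String) (out : Bool) : Prop := out = is_cloud_path_alt filepath
instance (filepath : String) (out : Bool) : Decidable (Spec_is_cloud_path filepath out) := by unfold Spec_is_cloud_path; infer_instance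

-- ===== CLAIM (what is proved, stated in full; the proofs are below) =====
def Claim_equal_is_cloud_path : Prop := ∀ (filepath : String), Dom_is_cloud_path filepath → Spec_is_cloud_path filepath (is_cloud_path filepath)

-- ===== LEMMAS AND PROOFS =====

-- Proof-only structural model of s.split("/") on '/' and its first segment
def preHd (x : List Char) : List (List Char) → List (List Char)
  | h :: r => (x ++ h) :: r
  | [] => [x]

def splitSlash : List Char → List (List Char)
  | [] => [[]]
  | c :: t => if c = '/' then [] :: splitSlash t else preHd [c] (splitSlash t)

def head0 : List Char → List Char
  | [] => []
  | c :: t => if c = '/' then [] else c :: head0 t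

theorem splitSlash_ne_nil (s : List Char) : splitSlash s ≠ [] := by
  cases s with
  | nil => simp [splitSlash]
  | cons c t =>
    simp only [splitSlash]
    split
    · simp
    · cases h : splitSlash t <;> simp [preHd]

theorem head_splitSlash (s : List Char) :
    ∃ r, splitSlash s = head0 s :: r := by
  induction s with
  | nil => exact ⟨[], rfl⟩
  | cons c t ih =>
    by_cases hc : c = '/'
    · subst hc; exact ⟨splitSlash t, by simp [splitSlash, head0]⟩
    · obtain ⟨r, hr⟩ := ih
      exact ⟨r, by simp [splitSlash, hc, hr, preHd, head0]⟩

theorem noSlash_splitSlash (s seg : List Char) (h : seg ∈ splitSlash s) : '/' ∉ seg := by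
  induction s generalizing seg with
  | nil => simp [splitSlash] at h; subst h; simp
  | cons c t ih =>
    by_cases hc : c = '/'
    · subst hc
      simp [splitSlash] at h
      rcases h with rfl | h
      · simp
      · exact ih _ h
    · simp only [splitSlash, if_neg hc] at h
      cases hs : splitSlash t with
      | nil => exact absurd hs (splitSlash_ne_nil t)
      | cons h0 r =>
        rw [hs] at h
        simp [preHd] at h
        rcases h with rfl | h
        · have := ih h0 (by rw [hs]; exact List.mem_cons_self)
          simp [Ne.symm hc]
          intro hmem
          exact this hmem
        · exact ih _ (by rw [hs]; exact List.mem_cons_of_mem _ h)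

-- a boundary-shaped pattern that fits in the first segment fits in its closure under takeWhile
theorem B_char (s : List Char) (w e : List Char) (hw : '/' ∉ w) (he : e = [] ∨ e = ['/']) :
    (w ++ e <+: s ++ ['/'] ↔ w ++ e <+: head0 s ++ ['/']) := by
  induction s generalizing w with
  | nil => rfl
  | cons c t ih =>
    by_cases hc : c = '/'
    · subst hc
      rw [show head0 ('/' :: t) = [] from by simp [head0]]
      cases w with
      | nil =>
        rcases he with rfl | rfl
        · simp
        · simp
      | cons w0 w' =>
        have hw0 : w0 ≠ '/' := by intro h; exact hw (by simp [h])
        constructor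
        · intro h
          rw [List.cons_append, List.cons_append, List.cons_prefix_cons] at h
          exact absurd h.1 hw0
        · intro h
          simp at h
          exact absurd h.1 hw0
    · rw [show head0 (c :: t) = c :: head0 t from by simp [head0, hc]]
      cases w with
      | nil =>
        rcases he with rfl | rfl
        · simp
        · constructor
          · intro h
            rw [List.nil_append, List.cons_append, List.cons_prefix_cons] at h
            exact absurd h.1 (Ne.symm hc)
          · intro h
            rw [List.nil_append, List.cons_append, List.cons_prefix_cons] at h
            exact absurd h.1 (Ne.symm hc)
      | cons w0 w' =>
        have hw' : '/' ∉ w' := fun hm => hw (by simp [hm])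
        rw [List.cons_append, List.cons_append, List.cons_prefix_cons,
            List.cons_append, List.cons_prefix_cons]
        rw [ih w' hw']

-- occurrences of '/'++p strictly inside s++'/' live in the non-first segments
theorem A_char (p w e : List Char) (hp : p = w ++ e) (hw : '/' ∉ w)
    (he : e = [] ∨ e = ['/']) (hne : p ≠ []) (s : List Char) :
    (('/' :: p) <:+: (s ++ ['/']) ↔ ∃ seg ∈ (splitSlash s).tail, p <+: seg ++ ['/']) := by
  induction s with
  | nil =>
    constructor
    · intro h
      cases p with
      | nil => exact absurd rfl hne
      | cons a q =>
        have := h.length_le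
        simp only [List.nil_append, List.length_cons, List.length_nil] at this
        omega
    · intro h
      simp [splitSlash] at h
  | cons c t ih =>
    rw [List.cons_append, List.infix_cons_iff]
    by_cases hc : c = '/'
    · subst hc
      obtain ⟨r, hr⟩ := head_splitSlash t
      rw [show (splitSlash ('/' :: t)).tail = splitSlash t from by simp [splitSlash]]
      rw [hr]
      constructor
      · rintro (hpre | hinf)
        · rw [List.cons_prefix_cons] at hpre
          have := (B_char t w e hw he).mp (hp ▸ hpre.2)
          exact ⟨head0 t, List.mem_cons_self, hp ▸ this⟩
        · obtain ⟨seg, hm, hpr⟩ := ih.mp hinf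
          have hmr : seg ∈ r := by rw [hr] at hm; simpa using hm
          exact ⟨seg, List.mem_cons_of_mem _ hmr, hpr⟩
      · rintro ⟨seg, hm, hpr⟩
        rcases List.mem_cons.mp hm with rfl | hm
        · exact Or.inl (List.cons_prefix_cons.mpr ⟨rfl, hp ▸ (B_char t w e hw he).mpr (hp ▸ hpr)⟩)
        · exact Or.inr (ih.mpr ⟨seg, by rw [hr]; simpa using hm, hpr⟩)
    · have htail : (splitSlash (c :: t)).tail = (splitSlash t).tail := by
        obtain ⟨r, hr⟩ := head_splitSlash t
        simp [splitSlash, hc, hr, preHd]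
      rw [htail]
      constructor
      · rintro (hpre | hinf)
        · rw [List.cons_prefix_cons] at hpre
          exact absurd hpre.1 (Ne.symm hc)
        · exact ih.mp hinf
      · intro h
        exact Or.inr (ih.mpr h)

-- the master boundary lemma: '/'++p occurs in '/'++s++'/' iff p fits at a segment of s
theorem master (p w e : List Char) (hp : p = w ++ e) (hw : '/' ∉ w)
    (he : e = [] ∨ e = ['/']) (hne : p ≠ []) (s : List Char) :
    (('/' :: p) <:+: ('/' :: (s ++ ['/'])) ↔ ∃ seg ∈ splitSlash s, p <+: seg ++ ['/']) := by
  obtain ⟨r, hr⟩ := head_splitSlash s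
  rw [List.infix_cons_iff, List.cons_prefix_cons, hr]
  constructor
  · rintro (⟨-, hpre⟩ | hinf)
    · exact ⟨head0 s, List.mem_cons_self, hp ▸ (B_char s w e hw he).mp (hp ▸ hpre)⟩
    · obtain ⟨seg, hm, hpr⟩ := (A_char p w e hp hw he hne s).mp hinf
      have hmr : seg ∈ r := by rw [hr] at hm; simpa using hm
      exact ⟨seg, List.mem_cons_of_mem _ hmr, hpr⟩
  · rintro ⟨seg, hm, hpr⟩
    rcases List.mem_cons.mp hm with rfl | hm
    · exact Or.inl ⟨rfl, hp ▸ (B_char s w e hw he).mpr (hp ▸ hpr)⟩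
    · exact Or.inr ((A_char p w e hp hw he hne s).mpr ⟨seg, by rw [hr]; simpa using hm, hpr⟩)

theorem exact_concat (w seg : List Char) (hw : '/' ∉ w) (hseg : '/' ∉ seg) :
    (w ++ ['/'] <+: seg ++ ['/'] ↔ w = seg) := by
  induction w generalizing seg with
  | nil =>
    cases seg with
    | nil => simp
    | cons c t =>
      simp only [List.nil_append, List.cons_append, List.cons_prefix_cons]
      constructor
      · rintro ⟨rfl, -⟩; exact absurd List.mem_cons_self hseg
      · intro h; exact absurd h (by simp)
  | cons a w' ih =>
    cases seg with
    | nil =>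
      simp only [List.cons_append, List.nil_append, List.cons_prefix_cons]
      constructor
      · rintro ⟨rfl, -⟩; exact absurd List.mem_cons_self hw
      · intro h; exact absurd h (by simp)
    | cons c t =>
      simp only [List.cons_append, List.cons_prefix_cons]
      rw [ih t (fun hm => hw (List.mem_cons_of_mem _ hm)) (fun hm => hseg (List.mem_cons_of_mem _ hm))]
      constructor
      · rintro ⟨rfl, rfl⟩; rfl
      · rintro h; injection h with h1 h2; exact ⟨h1, h2⟩

theorem prefix_concat_noSlash (p seg : List Char) (hp : '/' ∉ p) :
    (p <+: seg ++ ['/'] ↔ p <+: seg) := by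
  rw [List.prefix_concat_iff]
  constructor
  · rintro (rfl | h)
    · exact absurd (List.mem_append_right _ List.mem_cons_self) hp
    · exact h
  · exact Or.inr

theorem go_spec (fuel : Nat) (l cur : List Char) (acc : List (List Char)) (h : l.length ≤ fuel) :
    PySem.Chars.splitOn.go "/".toList fuel l cur acc
      = acc.reverse ++ preHd cur.reverse (splitSlash l) := by
  induction fuel generalizing l cur acc with
  | zero =>
    have : l = [] := by cases l <;> simp_all
    subst this
    simp [PySem.Chars.splitOn.go, splitSlash, preHd]
  | succ n ih =>
    cases l with
    | nil => simp [PySem.Chars.splitOn.go, splitSlash, preHd]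
    | cons c t =>
      by_cases hc : c = '/'
      · subst hc
        rw [show PySem.Chars.splitOn.go "/".toList (n+1) ('/' :: t) cur acc
              = PySem.Chars.splitOn.go "/".toList n t [] (cur.reverse :: acc) from by
            simp [PySem.Chars.splitOn.go, List.isPrefixOf]]
        rw [ih _ _ _ (by simpa using Nat.le_of_succ_le_succ (by simpa using h))]
        cases hs : splitSlash t with
        | nil => exact absurd hs (splitSlash_ne_nil t)
        | cons h0 r => simp [splitSlash, hs, preHd]
      · rw [show PySem.Chars.splitOn.go "/".toList (n+1) (c :: t) cur acc
              = PySem.Chars.splitOn.go "/".toList n t (c :: cur) acc from by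
            simp [PySem.Chars.splitOn.go, List.isPrefixOf, Ne.symm hc]]
        rw [ih _ _ _ (by simpa using Nat.le_of_succ_le_succ (by simpa using h))]
        cases hs : splitSlash t with
        | nil => exact absurd hs (splitSlash_ne_nil t)
        | cons h0 r => simp [splitSlash, hs, preHd, hc]

theorem splitOn_eq_splitSlash (s : List Char) :
    PySem.Chars.splitOn s "/".toList = splitSlash s := by
  rw [PySem.Chars.splitOn, go_spec (s.length + 1) s [] [] (by omega)]
  cases hs : splitSlash s with
  | nil => exact absurd hs (splitSlash_ne_nil s)
  | cons h0 r => simp [preHd]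

theorem main_any (s : List Char) :
    ((splitSlash s).any (fun seg =>
        cloudDirNames.contains seg
        || PySem.Chars.startswith seg "onedrive - ".toList
        || PySem.Chars.startswith seg "onedrive-".toList
        || PySem.Chars.startswith seg "nextcloud-".toList))
    = ((cloudNamesB.any (fun name => PySem.Chars.isIn ('/' :: (name ++ ['/'])) ('/' :: (s ++ ['/']))))
       || (cloudPrefixesB.any (fun p => PySem.Chars.isIn ('/' :: p) ('/' :: (s ++ ['/']))))) := by
  have hdirs : cloudDirNames = cloudNamesB := by decide
  have hname : ∀ n ∈ cloudNamesB, '/' ∉ n := by decide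
  have hpref : ∀ p ∈ cloudPrefixesB, '/' ∉ p ∧ p ≠ [] := by decide
  rw [Bool.eq_iff_iff]
  simp only [List.any_eq_true, Bool.or_eq_true, PySem.Chars.isIn_iff_infix,
    PySem.Chars.startswith_iff, List.contains_iff_mem, hdirs]
  constructor
  · rintro ⟨seg, hsegmem, ((hn | h1) | h2) | h3⟩
    · exact Or.inl ⟨seg, hn,
        (master (seg ++ ['/']) seg ['/'] rfl (hname seg hn) (Or.inr rfl) (by simp) s).mpr
          ⟨seg, hsegmem, List.prefix_rfl⟩⟩
    · exact Or.inr ⟨"onedrive - ".toList, by simp [cloudPrefixesB],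
        (master "onedrive - ".toList "onedrive - ".toList [] (by simp) (by decide) (Or.inl rfl) (by decide) s).mpr
          ⟨seg, hsegmem, (prefix_concat_noSlash _ seg (by decide)).mpr h1⟩⟩
    · exact Or.inr ⟨"onedrive-".toList, by simp [cloudPrefixesB],
        (master "onedrive-".toList "onedrive-".toList [] (by simp) (by decide) (Or.inl rfl) (by decide) s).mpr
          ⟨seg, hsegmem, (prefix_concat_noSlash _ seg (by decide)).mpr h2⟩⟩
    · exact Or.inr ⟨"nextcloud-".toList, by simp [cloudPrefixesB],
        (master "nextcloud-".toList "nextcloud-".toList [] (by simp) (by decide) (Or.inl rfl) (by decide) s).mpr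
          ⟨seg, hsegmem, (prefix_concat_noSlash _ seg (by decide)).mpr h3⟩⟩
  · rintro (⟨n, hn, hinf⟩ | ⟨p, hpm, hinf⟩)
    · obtain ⟨seg, hm, hpr⟩ :=
        (master (n ++ ['/']) n ['/'] rfl (hname n hn) (Or.inr rfl) (by simp) s).mp hinf
      have heq : n = seg := (exact_concat n seg (hname n hn) (noSlash_splitSlash s seg hm)).mp hpr
      exact ⟨seg, hm, Or.inl (Or.inl (Or.inl (heq ▸ hn)))⟩
    · obtain ⟨seg, hm, hpr⟩ :=
        (master p p [] (by simp) (hpref p hpm).1 (Or.inl rfl) (hpref p hpm).2 s).mp hinf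
      have hps := (prefix_concat_noSlash p seg (hpref p hpm).1).mp hpr
      rcases (by simpa [cloudPrefixesB] using hpm : p = "onedrive - ".toList ∨ p = "onedrive-".toList ∨ p = "nextcloud-".toList) with rfl | rfl | rfl
      · exact ⟨seg, hm, Or.inl (Or.inl (Or.inr hps))⟩
      · exact ⟨seg, hm, Or.inl (Or.inr hps)⟩
      · exact ⟨seg, hm, Or.inr hps⟩

-- ===== VERDICT (by name: the statement is the Claim_ definition above) =====
theorem is_cloud_path_spec : Claim_equal_is_cloud_path := by
  intro fp _
  unfold Spec_is_cloud_path
  simp only [is_cloud_path, is_cloud_path_alt]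
  rw [splitOn_eq_splitSlash, main_any]
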